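-- pv_equiv track=rewrite | github.com/YazonDA/CodeWars_task | IntroToArt.py | get_w
-- ===== SOURCE A (Python) =====
-- def get_w(height):
-- 	if height < 2:
-- 		return []
-- 	ans = [''] * height
-- 	ans_base = [' '] * height
-- 	height -= 1
-- 	ans_base[1] = '*'
-- 	for z in range(-1, 4 * height):
-- 		ind = 1 - ((z // height+1) % 2) * 2
-- 		ans_base = ans_base[ind:] + (ans_base[:ind])
-- 		ans = list(map(lambda x,y: x + y, ans, ans_base))
-- 	return ans
-- ===== SOURCE B (Python) =====
-- def get_w(height):
--     if height < 2:
--         return []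
--     H = height - 1
--     width = 4 * H + 1
--     rows = []
--     for r in range(H + 1):
--         row = []
--         for c in range(width):
--             t = c % (2 * H)
--             if t > H:
--                 t = 2 * H - t
--             row.append('*' if t == r else ' ')
--         rows.append(''.join(row))
--     return rows
-- ===== Notes on version B (the rewrite author's own statement) =====
-- stated objective: simpler
-- what changed: Replaces A's rotating one-hot base vector (two list slices re-concatenated and a full per-column zip/concat of all rows) with a direct per-cell formula: each column's star row is a triangle wave (t = c % (2H), folded at H) and each row is built in one pass, avoiding the repeated whole-list copying.
import Mathlib
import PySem

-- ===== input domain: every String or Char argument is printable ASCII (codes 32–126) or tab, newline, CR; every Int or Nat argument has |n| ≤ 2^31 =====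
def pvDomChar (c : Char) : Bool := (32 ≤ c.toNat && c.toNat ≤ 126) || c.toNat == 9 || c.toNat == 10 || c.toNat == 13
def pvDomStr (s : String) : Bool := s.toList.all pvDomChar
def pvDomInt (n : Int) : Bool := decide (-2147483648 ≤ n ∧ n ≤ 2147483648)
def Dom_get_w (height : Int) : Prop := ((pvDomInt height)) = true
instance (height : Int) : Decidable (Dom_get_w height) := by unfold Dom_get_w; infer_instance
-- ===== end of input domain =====

-- B replaces A's rotating one-hot base vector (slicing and re-concatenating two lists per
-- column) by a direct per-cell triangle-wave formula; objective: simpler.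

-- ===== PORT A =====
-- the body of A's `for z in range(-1, 4*height)` loop (h is the decremented height;
-- rows are kept as `List Char` and turned into `String` at the very end, per the
-- PySem convention of working on the char-list side)
def get_w_step (h : Int) (st : List (List Char) × List Char) (z : Int) :
    List (List Char) × List Char :=
  let ind : Int := 1 - PySem.Int.mod (PySem.Int.floordiv z h + 1) 2 * 2
  let base' := PySem.List.slice st.2 (some ind) none ++ PySem.List.slice st.2 none (some ind)
  (List.zipWith (fun x y => x ++ [y]) st.1 base', base')

def get_w (height : Int) : List String :=
  if height < 2 then []
  else
    let ans : List (List Char) := List.replicate height.toNat []   -- [''] * height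
    let ansBase : List Char := List.replicate height.toNat ' '     -- [' '] * height
    let h := height - 1                                            -- height -= 1
    let ansBase := ansBase.set 1 '*'                               -- ans_base[1] = '*'
    let res := (PySem.List.pyRange (-1) (4 * h)).foldl (get_w_step h) (ans, ansBase)
    res.1.map String.mk

-- ===== PORT B =====
-- one cell of B's grid: `t = c % (2*H); if t > H: t = 2*H - t; '*' if t == r else ' '`
def get_w_cell (H r c : Nat) : Char :=
  let t := c % (2 * H)
  let t := if t > H then 2 * H - t else t
  if t == r then '*' else ' '

-- B's inner loop: build row r column by column
def get_w_row (H r : Nat) : List Char :=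
  (List.range (4 * H + 1)).foldl (fun row c => row ++ [get_w_cell H r c]) []

def get_w_alt (height : Int) : List String :=
  if height < 2 then []
  else
    let H : Nat := (height - 1).toNat
    (List.range (H + 1)).foldl (fun rows r => rows ++ [String.mk (get_w_row H r)]) []

-- ===== PRECONDITION & SPEC =====
def Spec_get_w (height : Int) (out : List String) : Prop := out = get_w_alt height
instance (height : Int) (out : List String) : Decidable (Spec_get_w height out) := by unfold Spec_get_w; infer_instance

-- ===== CLAIM (what is proved, stated in full; the proofs are below) =====
def Claim_equal_get_w : Prop := ∀ (height : Int), Dom_get_w height → Spec_get_w height (get_w height)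

-- ===== LEMMAS AND PROOFS =====

-- the star's row in column c (B's triangle wave)
def pvWave (H c : Nat) : Nat :=
  if c % (2 * H) > H then 2 * H - c % (2 * H) else c % (2 * H)

-- one-hot char vector: p spaces, a star, m spaces (A's `ans_base` is always of this shape)
def pvHot (p m : Nat) : List Char :=
  List.replicate p ' ' ++ '*' :: List.replicate m ' '

-- the first m columns of every row
def pvRows (H m : Nat) : List (List Char) :=
  (List.range (H + 1)).map (fun i =>
    (List.range m).map (fun c => if pvWave H c = i then '*' else ' '))

lemma pvZipWith_map_map {α β γ δ : Type} (f : β → γ → δ) (g : α → β) (h : α → γ) (l : List α) :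
    List.zipWith f (l.map g) (l.map h) = l.map (fun x => f (g x) (h x)) := by
  induction l with
  | nil => rfl
  | cons a t ih => simp [ih]

lemma pvIfComm (a b : Nat) : (if a = b then '*' else ' ') = (if b = a then '*' else ' ') := by
  rcases eq_or_ne a b with h | h
  · simp [h]
  · simp [h, h.symm]

lemma pvWave_le (H c : Nat) (hH : 1 ≤ H) : pvWave H c ≤ H := by
  unfold pvWave
  have : c % (2 * H) < 2 * H := Nat.mod_lt _ (by omega)
  split <;> omega

lemma pvWave_zero (H : Nat) : pvWave H 0 = 0 := by
  simp [pvWave]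

-- triangle-wave step: parity of c / H decides whether the wave goes up or down
lemma pvWave_step (H c : Nat) (hH : 1 ≤ H) (_hc : c < 4 * H) :
    (c / H % 2 = 0 → pvWave H c < H ∧ pvWave H (c + 1) = pvWave H c + 1) ∧
    (c / H % 2 = 1 → 1 ≤ pvWave H c ∧ pvWave H c = pvWave H (c + 1) + 1) := by
  obtain ⟨q, r, hqr, hr⟩ : ∃ q r, c = 2 * H * q + r ∧ r < 2 * H :=
    ⟨c / (2 * H), c % (2 * H), (Nat.div_add_mod c (2 * H)).symm, Nat.mod_lt _ (by omega)⟩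
  have hrmod : c % (2 * H) = r := by rw [hqr, Nat.mul_add_mod, Nat.mod_eq_of_lt hr]
  have hdiv : c / H = r / H + 2 * q := by
    have h1 : c = r + H * (2 * q) := by rw [hqr]; ring
    rw [h1, Nat.add_mul_div_left _ _ (by omega : 0 < H)]
  have hcase : r < H ∨ (H ≤ r ∧ r / H = 1) := by
    rcases Nat.lt_or_ge r H with h | h
    · exact Or.inl h
    · refine Or.inr ⟨h, le_antisymm ?_ ((Nat.one_le_div_iff (by omega)).2 h)⟩
      have : r / H < 2 := (Nat.div_lt_iff_lt_mul (by omega : 0 < H)).2 (by omega)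
      omega
  have hwc : pvWave H c = if r > H then 2 * H - r else r := by unfold pvWave; rw [hrmod]
  have hmod1 : r + 1 < 2 * H → (c + 1) % (2 * H) = r + 1 := by
    intro h
    have h1 : c + 1 = 2 * H * q + (r + 1) := by omega
    rw [h1, Nat.mul_add_mod, Nat.mod_eq_of_lt h]
  have hmod2 : r + 1 = 2 * H → (c + 1) % (2 * H) = 0 := by
    intro h
    have h1 : c + 1 = 2 * H * q + 2 * H := by omega
    have h2 : 2 * H * q + 2 * H = 2 * H * (q + 1) := by ring
    rw [h1, h2, Nat.mul_mod_right]
  constructor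
  · intro he
    rw [hdiv] at he
    have hlt : r < H := by
      rcases hcase with h | ⟨_, h1⟩
      · exact h
      · exfalso; rw [h1] at he; omega
    have hw1 : pvWave H (c + 1) = if r + 1 > H then 2 * H - (r + 1) else r + 1 := by
      unfold pvWave; rw [hmod1 (by omega)]
    rw [hwc, hw1]
    constructor
    · split <;> omega
    · split <;> split <;> omega
  · intro ho
    rw [hdiv] at ho
    have hge : H ≤ r := by
      rcases hcase with h | ⟨h, _⟩
      · exfalso; rw [Nat.div_eq_of_lt h] at ho; omega
      · exact h
    by_cases hend : r + 1 = 2 * H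
    · have hw1 : pvWave H (c + 1) = 0 := by
        unfold pvWave; rw [hmod2 hend]; simp
      rw [hwc, hw1]
      constructor
      · split <;> omega
      · split <;> omega
    · have hw1 : pvWave H (c + 1) = if r + 1 > H then 2 * H - (r + 1) else r + 1 := by
        unfold pvWave; rw [hmod1 (by omega)]
      rw [hwc, hw1]
      constructor
      · split <;> omega
      · split <;> split <;> omega

lemma pvHot_eq_map (p m : Nat) :
    pvHot p m = (List.range (p + m + 1)).map (fun i => if i = p then '*' else ' ') := by
  apply List.ext_getElem
  · simp [pvHot]; omega
  · intro i h1 h2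
    simp only [pvHot] at h1 ⊢
    simp only [List.getElem_map, List.getElem_range]
    rcases Nat.lt_trichotomy i p with h | h | h
    · rw [List.getElem_append_left (by simpa using h)]
      simp [List.getElem_replicate, Nat.ne_of_lt h]
    · subst h
      rw [List.getElem_append_right (by simp)]
      simp
    · rw [List.getElem_append_right (by simp; omega)]
      have : i - p ≠ 0 := by omega
      rcases Nat.exists_eq_succ_of_ne_zero this with ⟨k, hk⟩
      simp only [List.length_replicate, hk]
      simp [Nat.ne_of_gt h]

lemma pvSlice_to_neg_one {α : Type} (xs : List α) (h : xs ≠ []) :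
    PySem.List.slice xs none (some (-1)) = xs.take (xs.length - 1) := by
  simp only [PySem.List.slice, PySem.List.clampIdx]
  have hx : 0 < xs.length := List.length_pos_iff.2 h
  have h1 : ((xs.length : Int) + -1 < 0) = False := by simp; omega
  norm_num [h1]
  omega

-- rotate right (ind = -1): ans_base[-1:] + ans_base[:-1] moves the star one row down
lemma pvRotR (p m : Nat) :
    PySem.List.slice (pvHot p (m + 1)) (some (-1)) none ++
      PySem.List.slice (pvHot p (m + 1)) none (some (-1)) = pvHot (p + 1) m := by
  have hsplit : pvHot p (m + 1) = (pvHot p m) ++ [' '] := by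
    simp [pvHot, List.replicate_succ' (n := m)]
  have hlen2 : (pvHot p (m + 1)).length = (pvHot p m).length + 1 := by
    rw [hsplit]; simp
  rw [PySem.List.slice_from_neg_one, pvSlice_to_neg_one _ (by simp [pvHot])]
  rw [hlen2]
  simp only [Nat.add_sub_cancel]
  rw [hsplit, List.drop_left, List.take_left]
  show ' ' :: pvHot p m = pvHot (p + 1) m
  simp [pvHot, List.replicate_succ]

-- rotate left (ind = 1): ans_base[1:] + ans_base[:1] moves the star one row up
lemma pvRotL (p m : Nat) :
    PySem.List.slice (pvHot (p + 1) m) (some 1) none ++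
      PySem.List.slice (pvHot (p + 1) m) none (some 1) = pvHot p (m + 1) := by
  rw [PySem.List.slice_from _ (by norm_num : (0:Int) ≤ 1),
      PySem.List.slice_to _ (by norm_num : (0:Int) ≤ 1)]
  have hcons : pvHot (p + 1) m = ' ' :: pvHot p m := by
    simp [pvHot, List.replicate_succ]
  rw [hcons]
  show pvHot p m ++ [' '] = pvHot p (m + 1)
  simp [pvHot, List.replicate_succ' (n := m)]

-- one loop step of A, at a nonnegative z = c, in terms of the invariant
lemma pvStep (H c : Nat) (hH : 1 ≤ H) (hc : c < 4 * H) :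
    get_w_step (H : Int) (pvRows H (c + 1), pvHot (pvWave H c) (H - pvWave H c)) (c : Int) =
      (pvRows H (c + 2), pvHot (pvWave H (c + 1)) (H - pvWave H (c + 1))) := by
  have hwle := pvWave_le H c hH
  have hwle' := pvWave_le H (c + 1) hH
  have hstep := pvWave_step H c hH hc
  have hbase : ∀ w : Nat, w ≤ H →
      pvHot w (H - w) = (List.range (H + 1)).map (fun i => if i = w then '*' else ' ') := by
    intro w hw
    rw [pvHot_eq_map]
    congr 2
    omega
  have hind : PySem.Int.mod (PySem.Int.floordiv (c : Int) (H : Int) + 1) 2 =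
      (((c / H + 1) % 2 : Nat) : Int) := by
    rw [PySem.Int.floordiv_natCast]
    rw [show ((c / H : Nat) : Int) + 1 = (((c / H + 1 : Nat)) : Int) by push_cast; ring]
    exact PySem.Int.mod_natCast _ _
  have hrot : PySem.List.slice (pvHot (pvWave H c) (H - pvWave H c))
        (some (1 - (((c / H + 1) % 2 : Nat) : Int) * 2)) none ++
      PySem.List.slice (pvHot (pvWave H c) (H - pvWave H c)) none
        (some (1 - (((c / H + 1) % 2 : Nat) : Int) * 2)) =
      pvHot (pvWave H (c + 1)) (H - pvWave H (c + 1)) := by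
    rcases Nat.mod_two_eq_zero_or_one (c / H) with he | ho
    · -- even: ind = -1, rotate right, wave goes up
      obtain ⟨hlt, hsucc⟩ := hstep.1 he
      have hp : (c / H + 1) % 2 = 1 := by omega
      rw [hp]
      norm_num
      have hm : H - pvWave H c = (H - pvWave H c - 1) + 1 := by omega
      rw [hm, pvRotR, hsucc]
      congr 1
    · -- odd: ind = 1, rotate left, wave goes down
      obtain ⟨hge, hsucc⟩ := hstep.2 ho
      have hp : (c / H + 1) % 2 = 0 := by omega
      rw [hp]
      norm_num
      rw [hsucc, pvRotL]
      congr 1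
      omega
  unfold get_w_step
  simp only [hind, hrot]
  congr 1
  rw [hbase _ hwle']
  unfold pvRows
  rw [pvZipWith_map_map]
  apply List.map_congr_left
  intro i _
  conv_rhs => rw [List.range_succ, List.map_append]
  simp only [List.map_cons, List.map_nil]
  rw [pvIfComm]

-- the whole loop from z = c up, by induction on the remaining iterations
lemma pvLoop (H : Nat) (hH : 1 ≤ H) :
    ∀ (d c : Nat), c + d = 4 * H →
      ((PySem.List.pyRange (c : Int) ((4 * H : Nat) : Int)).foldl (get_w_step (H : Int))
        (pvRows H (c + 1), pvHot (pvWave H c) (H - pvWave H c))).1 = pvRows H (4 * H + 1) := by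
  intro d
  induction d with
  | zero =>
    intro c hc
    have hce : c = 4 * H := by omega
    subst hce
    rw [PySem.List.pyRange_one_eq_nil (le_refl _)]
    simp
  | succ d ih =>
    intro c hc
    have hlt : (c : Int) < ((4 * H : Nat) : Int) := by exact_mod_cast (by omega : c < 4 * H)
    rw [PySem.List.pyRange_one_cons hlt, List.foldl_cons, pvStep H c hH (by omega)]
    have := ih (c + 1) (by omega)
    rw [show ((c : Int) + 1) = ((c + 1 : Nat) : Int) by push_cast; ring]
    exact this

-- ===== VERDICT (by name: the statement is the Claim_ definition above) =====
theorem get_w_spec : Claim_equal_get_w := by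
  intro height _
  unfold Spec_get_w get_w get_w_alt
  by_cases h2 : height < 2
  · simp [h2]
  · simp only [if_neg h2]
    have hge : (2 : Int) ≤ height := by omega
    set H : Nat := (height - 1).toNat with hH
    have hH1 : 1 ≤ H := by omega
    have hht : height.toNat = H + 1 := by omega
    have hcast : height - 1 = (H : Int) := by omega
    -- A's side: first iteration (z = -1) by hand, then the loop lemma
    have hbase0 : (List.replicate height.toNat ' ').set 1 '*' = pvHot 1 (H - 1) := by
      rw [hht, show H + 1 = (H - 1) + 2 by omega]
      simp [List.replicate_succ, List.set, pvHot]
    have hrange : PySem.List.pyRange (-1) (4 * (height - 1)) =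
        -1 :: PySem.List.pyRange ((0 : Nat) : Int) ((4 * H : Nat) : Int) := by
      rw [hcast, show (4 : Int) * (H : Int) = ((4 * H : Nat) : Int) by push_cast; ring]
      rw [PySem.List.pyRange_one_cons (by exact_mod_cast (by omega : (-1 : Int) < (4 * H : Int)))]
      norm_num
    -- the z = -1 step
    have hstep0 : get_w_step ((H : Nat) : Int)
        (List.replicate height.toNat [], pvHot 1 (H - 1)) (-1) =
        (pvRows H (0 + 1), pvHot (pvWave H 0) (H - pvWave H 0)) := by
      unfold get_w_step
      have hfd : PySem.Int.floordiv (-1) ((H : Nat) : Int) = -1 := by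
        rw [PySem.Int.floordiv_eq_iff_of_pos (by exact_mod_cast hH1)]
        constructor
        · have h1 : (1 : Int) ≤ (H : Int) := by exact_mod_cast hH1
          nlinarith
        · norm_num
      rw [hfd]
      norm_num
      have h01 : pvHot 1 (H - 1) = pvHot (0 + 1) (H - 1) := by norm_num
      rw [h01, pvRotL, show (H - 1) + 1 = H by omega]
      constructor
      · have hrep : List.replicate height.toNat ([] : List Char) =
            (List.range (H + 1)).map (fun _ => ([] : List Char)) := by
          rw [hht]
          simp [List.map_const']
        rw [hrep, pvHot_eq_map, show 0 + H + 1 = H + 1 by omega, pvZipWith_map_map]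
        unfold pvRows
        apply List.map_congr_left
        intro i _
        simp only [List.range_one, List.map_cons, List.map_nil, List.nil_append, pvWave_zero]
        rw [pvIfComm]
      · simp [pvWave_zero]
    rw [hrange, List.foldl_cons, hcast, hbase0, hstep0]
    have hloop := pvLoop H hH1 (4 * H) 0 (by omega)
    rw [hloop]
    -- B's side: turn the two append-folds into maps and compare cell by cell
    rw [PySem.List.foldl_append_singleton_eq_map (f := fun r => String.mk (get_w_row H r))]
    unfold pvRows
    rw [List.map_map]
    simp only [List.nil_append]
    apply List.map_congr_left
    intro i _
    show String.mk _ = String.mk _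
    congr 1
    unfold get_w_row
    rw [PySem.List.foldl_append_singleton_eq_map (f := fun c => get_w_cell H i c)]
    simp only [List.nil_append]
    apply List.map_congr_left
    intro c _
    simp [get_w_cell, pvWave, beq_iff_eq]
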